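-- pv_equiv track=rewrite | github.com/tonicanada/conta-atlas | scripts/linkify_terms.py | find_block_ranges
-- ===== SOURCE A (Python) =====
-- from typing import Dict, Iterable, List, Optional, Sequence, Tuple
--
-- def find_block_ranges(text: str, start_marker: str, end_marker: str) -> List[Tuple[int, int]]:
--     ranges: List[Tuple[int, int]] = []
--     start = 0
--     while True:
--         s = text.find(start_marker, start)
--         if s == -1:
--             break
--         e = text.find(end_marker, s + len(start_marker))
--         if e == -1:
--             break
--         inner_start = s + len(start_marker)
--         inner_end = e
--         ranges.append((inner_start, inner_end))
--         start = e + len(end_marker)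
--     return ranges
-- ===== SOURCE B (Python) =====
-- def _occurrences(text, pat):
--     # all indices i (0..len(text)) where pat occurs at i
--     return [i for i in range(len(text) + 1) if text.startswith(pat, i)]
--
-- def find_block_ranges(text, start_marker, end_marker):
--     starts = _occurrences(text, start_marker)
--     ends = _occurrences(text, end_marker)
--     ranges = []
--     cursor = 0
--     for s in starts:
--         if s < cursor:
--             continue
--         inner = s + len(start_marker)
--         while ends and ends[0] < inner:
--             ends = ends[1:]
--         if not ends:
--             break
--         e = ends[0]
--         ranges.append((inner, e))
--         cursor = e + len(end_marker)
--     return ranges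
-- ===== Notes on version B (the rewrite author's own statement) =====
-- stated objective: alternative
-- what changed: A's cursor-driven while-loop of repeated text.find calls is replaced by precomputing the occurrence-index lists of both markers once and merging them with a single two-pointer sweep (skip starts below the cursor, drop ends below the inner position).
import Mathlib
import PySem

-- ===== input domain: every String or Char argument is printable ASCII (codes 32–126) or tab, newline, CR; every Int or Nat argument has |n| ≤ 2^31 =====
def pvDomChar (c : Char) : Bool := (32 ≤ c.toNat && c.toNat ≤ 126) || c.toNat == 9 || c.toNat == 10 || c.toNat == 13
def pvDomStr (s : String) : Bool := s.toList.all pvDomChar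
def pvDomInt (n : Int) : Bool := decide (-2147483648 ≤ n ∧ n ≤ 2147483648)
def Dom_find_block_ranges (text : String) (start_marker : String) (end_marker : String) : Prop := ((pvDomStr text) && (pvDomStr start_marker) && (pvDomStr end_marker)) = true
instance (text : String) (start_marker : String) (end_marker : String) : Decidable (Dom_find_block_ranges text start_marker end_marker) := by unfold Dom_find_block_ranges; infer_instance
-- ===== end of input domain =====

-- B replaces A's cursor/while/find loop by precomputing the two occurrence-index
-- lists once and merging them with a single two-pointer sweep (objective: alternative).

-- ===== PORT A =====
-- A's 'while True' loop, with fuel: inside Pre_ (markers not both empty) 'start'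
-- strictly increases every iteration and every findFrom argument stays ≤ len(text),
-- so len(text)+2 iterations always suffice; outside Pre_ the Python loops forever.
def loopA (t sm em : List Char) : Nat → Int → List (Int × Int)
  | 0, _ => []
  | fuel+1, start =>
    let s := PySem.Chars.findFrom t sm start none          -- s = text.find(start_marker, start)
    if s = -1 then []
    else
      let e := PySem.Chars.findFrom t em (s + sm.length) none  -- e = text.find(end_marker, s + len(start_marker))
      if e = -1 then []
      else (s + (sm.length : Int), e) :: loopA t sm em fuel (e + em.length)

def find_block_ranges (text : String) (start_marker : String) (end_marker : String) : List (Int × Int) :=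
  loopA text.toList start_marker.toList end_marker.toList (text.toList.length + 2) 0

-- ===== PORT B =====
-- text.startswith(pat, i) for 0 ≤ i: exact as startswith on the drop
def startsWithAt (t p : List Char) (i : Nat) : Bool := PySem.Chars.startswith (t.drop i) p

-- _occurrences: [i for i in range(len(text)+1) if text.startswith(pat, i)]
def occurrences (t p : List Char) : List Nat := (List.range (t.length + 1)).filter (startsWithAt t p)

-- the for-loop over 'starts' with the inner while 'ends = ends[1:]' (a dropWhile) and break
def loopB (smLen emLen : Nat) : List Nat → List Nat → Nat → List (Int × Int)
  | [], _, _ => []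
  | s :: starts, ends, cursor =>
    if s < cursor then loopB smLen emLen starts ends cursor
    else
      match ends.dropWhile (fun e => e < s + smLen) with
      | [] => []
      | e :: rest => (((s + smLen : Nat) : Int), (e : Int)) :: loopB smLen emLen starts (e :: rest) (e + emLen)

def find_block_ranges_alt (text : String) (start_marker : String) (end_marker : String) : List (Int × Int) :=
  loopB start_marker.toList.length end_marker.toList.length
    (occurrences text.toList start_marker.toList) (occurrences text.toList end_marker.toList) 0

-- ===== PRECONDITION & SPEC =====
-- Pre_ excludes only the inputs where both markers are empty: there Python A never
-- returns (its cursor stops advancing and the while-loop runs forever).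
def Pre_find_block_ranges (text : String) (start_marker : String) (end_marker : String) : Prop :=
  ¬ (start_marker = "" ∧ end_marker = "")
instance (text : String) (start_marker : String) (end_marker : String) : Decidable (Pre_find_block_ranges text start_marker end_marker) := by unfold Pre_find_block_ranges; infer_instance

def pvWitness_find_block_ranges : String × String × String := ("a[b]c[d]", "[", "]")

def Spec_find_block_ranges (text : String) (start_marker : String) (end_marker : String) (out : List (Int × Int)) : Prop := out = find_block_ranges_alt text start_marker end_marker
instance (text : String) (start_marker : String) (end_marker : String) (out : List (Int × Int)) : Decidable (Spec_find_block_ranges text start_marker end_marker out) := by unfold Spec_find_block_ranges; infer_instance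

-- ===== CLAIM (what is proved, stated in full; the proofs are below) =====
def Claim_equal_find_block_ranges : Prop := ∀ (text : String) (start_marker : String) (end_marker : String), Dom_find_block_ranges text start_marker end_marker → Pre_find_block_ranges text start_marker end_marker → Spec_find_block_ranges text start_marker end_marker (find_block_ranges text start_marker end_marker)

-- ===== LEMMAS AND PROOFS =====

lemma mem_occurrences {t p : List Char} {i : Nat} :
    i ∈ occurrences t p ↔ i ≤ t.length ∧ p <+: t.drop i := by
  simp [occurrences, startsWithAt, List.mem_filter, List.mem_range,
    PySem.Chars.startswith_iff]

lemma occurrences_bound {t p : List Char} {i : Nat} (h : i ∈ occurrences t p) :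
    i + p.length ≤ t.length := by
  obtain ⟨hle, hpre⟩ := mem_occurrences.mp h
  have := hpre.length_le
  simp [List.length_drop] at this
  omega

lemma occurrences_pairwise (t p : List Char) : (occurrences t p).Pairwise (· < ·) :=
  List.Pairwise.filter _ List.pairwise_lt_range

-- least occurrence ≥ k is the head of the dropWhile
lemma dropWhile_head_least {t p : List Char} {k i : Nat} {rest : List Nat}
    (h : (occurrences t p).dropWhile (· < k) = i :: rest) :
    i ∈ occurrences t p ∧ k ≤ i ∧ ∀ x ∈ occurrences t p, k ≤ x → i ≤ x := by
  have hmem : i ∈ occurrences t p :=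
    (List.dropWhile_sublist (l := occurrences t p) (· < k)).subset (h ▸ List.mem_cons_self)
  have hki : ¬ i < k := by
    have := List.head_dropWhile_not (l := occurrences t p) (· < k) (by simp [h])
    simpa [h] using this
  refine ⟨hmem, by omega, ?_⟩
  intro x hx hkx
  -- x is in the dropWhile part (elements of takeWhile satisfy < k)
  have hsplit := List.takeWhile_append_dropWhile (p := (· < k)) (l := occurrences t p)
  have hx' : x ∈ (occurrences t p).takeWhile (· < k) ∨ x ∈ i :: rest := by
    rw [← h, ← List.mem_append, hsplit]; exact hx
  rcases hx' with hx' | hx'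
  · have := List.mem_takeWhile_imp hx'
    simp at this; omega
  · rcases List.mem_cons.mp hx' with rfl | hx'
    · omega
    · have hp := occurrences_pairwise t p
      have hp' : (i :: rest).Pairwise (· < ·) := h ▸ hp.sublist (List.dropWhile_sublist _)
      have := (List.pairwise_cons.mp hp').1 x hx'
      omega

lemma findFrom_of_dropWhile_nil {t p : List Char} {k : Nat} (hk : k ≤ t.length)
    (h : (occurrences t p).dropWhile (· < k) = []) :
    PySem.Chars.findFrom t p (k : Int) none = -1 := by
  rw [PySem.Chars.findFrom_natCast_eq_neg_one_iff t p k hk]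
  intro hinf
  have : ∃ j, p <+: (t.drop k).drop j :=
    (PySem.Chars.exists_prefix_drop_iff_isIn p (t.drop k)).mpr
      ((PySem.Chars.isIn_iff_infix p (t.drop k)).mpr hinf)
  obtain ⟨j, hj⟩ := this
  rw [List.drop_drop] at hj
  have hall := List.dropWhile_eq_nil_iff.mp h
  by_cases hjk : k + j ≤ t.length
  · have : k + j ∈ occurrences t p := mem_occurrences.mpr ⟨hjk, hj⟩
    have := hall _ this
    simp at this
  · -- occurrence past the end: p must be empty, so k itself is an occurrence
    have : t.drop (k + j) = [] := List.drop_eq_nil_of_le (by omega)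
    rw [this] at hj
    have hpnil : p = [] := List.prefix_nil.mp hj
    have : k ∈ occurrences t p := mem_occurrences.mpr ⟨hk, by simp [hpnil]⟩
    have := hall _ this
    simp at this

lemma findFrom_of_dropWhile_cons {t p : List Char} {k i : Nat} {rest : List Nat}
    (hk : k ≤ t.length) (h : (occurrences t p).dropWhile (· < k) = i :: rest) :
    PySem.Chars.findFrom t p (k : Int) none = (i : Int) := by
  obtain ⟨hmem, hki, hleast⟩ := dropWhile_head_least h
  obtain ⟨hile, hpre⟩ := mem_occurrences.mp hmem
  have hne : PySem.Chars.findFrom t p (k : Int) none ≠ -1 := by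
    intro hEq
    rw [PySem.Chars.findFrom_natCast_eq_neg_one_iff t p k hk] at hEq
    exact hEq ((PySem.Chars.isIn_iff_infix p (t.drop k)).mp
      ((PySem.Chars.exists_prefix_drop_iff_isIn p (t.drop k)).mp
        ⟨i - k, by rw [List.drop_drop, Nat.add_sub_cancel' hki]; exact hpre⟩))
  obtain ⟨hkf, hfpre, hmin⟩ := PySem.Chars.findFrom_natCast_spec t p k hk hne
  set f := PySem.Chars.findFrom t p (k : Int) none with hf
  have hf0 : 0 ≤ f := le_trans (by exact_mod_cast Int.natCast_nonneg k) hkf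
  have hkfN : k ≤ f.toNat := by omega
  have hfle : f.toNat ≤ i := by
    by_contra hlt
    exact hmin i hki (by omega) hpre
  have hfN_le_len : f.toNat ≤ t.length := by
    by_cases hp : p = []
    · subst hp
      -- minimality forces f.toNat ≤ k
      by_contra _
      have : ¬ f.toNat ≤ k → False := by
        intro hgt
        exact hmin k le_rfl (by omega) (by simp)
      omega
    · have : p.length ≤ (t.drop f.toNat).length := hfpre.length_le
      have hp' : 0 < p.length := List.length_pos_iff.mpr hp
      simp [List.length_drop] at this
      omega
  have : i ≤ f.toNat := hleast _ (mem_occurrences.mpr ⟨hfN_le_len, hfpre⟩) hkfN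
  omega

-- generic: composing two lower-bound dropWhiles keeps only the stronger one
lemma dropWhile_lt_dropWhile_lt {l : List Nat} {a b : Nat} (hab : a ≤ b) :
    (l.dropWhile (· < a)).dropWhile (· < b) = l.dropWhile (· < b) := by
  induction l with
  | nil => rfl
  | cons x xs ih =>
    by_cases hx : x < a
    · simp [hx, show x < b by omega, ih]
    · simp [List.dropWhile_cons, hx]

-- skipping the leading starts below the cursor is what loopB's first branch does
lemma loopB_dropWhile (smLen emLen : Nat) (E : List Nat) (c : Nat) :
    ∀ S : List Nat, loopB smLen emLen S E c = loopB smLen emLen (S.dropWhile (· < c)) E c := by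
  intro S
  induction S with
  | nil => rfl
  | cons s ss ih =>
    by_cases hs : s < c
    · simpa [loopB, hs, List.dropWhile_cons] using ih
    · simp [loopB, hs]

lemma loopA_eq_loopB (t sm em : List Char) (hne : ¬ (sm = [] ∧ em = [])) :
    ∀ fuel c d : Nat, d ≤ c → c ≤ t.length → t.length + 2 ≤ fuel + c →
      loopA t sm em fuel (c : Int) =
        loopB sm.length em.length ((occurrences t sm).dropWhile (· < c))
          ((occurrences t em).dropWhile (· < d)) c := by
  intro fuel
  induction fuel with
  | zero => intro c d _ hc hf; omega
  | succ fuel ih =>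
    intro c d hdc hc hf
    rcases hS : (occurrences t sm).dropWhile (· < c) with _ | ⟨s, restS⟩
    · rw [loopA]
      rw [findFrom_of_dropWhile_nil hc hS]
      simp [loopB]
    · obtain ⟨hsmem, hcs, _⟩ := dropWhile_head_least hS
      have hsb : s + sm.length ≤ t.length := occurrences_bound hsmem
      rw [loopA]
      rw [findFrom_of_dropWhile_cons hc hS]
      have hs0 : ((s : Int)) ≠ -1 := by omega
      simp only [hs0, if_false]
      have hcast : ((s : Int) + (sm.length : Int)) = ((s + sm.length : Nat) : Int) := by push_cast; ring
      rw [hcast]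
      have hEdrop : ((occurrences t em).dropWhile (· < d)).dropWhile (fun e => e < s + sm.length)
          = (occurrences t em).dropWhile (· < (s + sm.length)) :=
        dropWhile_lt_dropWhile_lt (by omega)
      rcases hE : (occurrences t em).dropWhile (· < (s + sm.length)) with _ | ⟨e, restE⟩
      · rw [findFrom_of_dropWhile_nil hsb hE]
        rw [loopB]
        simp only [if_neg (show ¬ s < c by omega)]
        rw [hEdrop, hE]
        simp
      · obtain ⟨hemem, hse, _⟩ := dropWhile_head_least hE
        have heb : e + em.length ≤ t.length := occurrences_bound hemem
        have hlen1 : 1 ≤ sm.length + em.length := by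
          rcases Nat.eq_zero_or_pos (sm.length + em.length) with h0 | h1
          · exact absurd ⟨List.eq_nil_of_length_eq_zero (by omega),
              List.eq_nil_of_length_eq_zero (by omega)⟩ hne
          · exact h1
        rw [findFrom_of_dropWhile_cons hsb hE]
        have he0 : ((e : Int)) ≠ -1 := by omega
        simp only [he0, if_false]
        rw [loopB]
        simp only [if_neg (show ¬ s < c by omega)]
        rw [hEdrop, hE]
        refine congrArg₂ _ rfl ?_
        have hcast2 : ((e : Int) + (em.length : Int)) = ((e + em.length : Nat) : Int) := by push_cast; ring
        rw [hcast2]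
        have hIH := ih (e + em.length) (s + sm.length) (by omega) heb (by omega)
        have hstarts : (occurrences t sm).dropWhile (· < (e + em.length))
            = restS.dropWhile (· < (e + em.length)) := by
          rw [← dropWhile_lt_dropWhile_lt (l := occurrences t sm) (a := c) (b := e + em.length) (by omega),
            hS, List.dropWhile_cons]
          simp only [decide_eq_true_eq, if_pos (show s < e + em.length by omega)]
        rw [hIH, hstarts, ← loopB_dropWhile, hE]

lemma dropWhile_lt_zero (l : List Nat) : l.dropWhile (· < 0) = l := by
  cases l <;> simp

-- ===== VERDICT (by name: the statement is the Claim_ definition above) =====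
theorem find_block_ranges_spec : Claim_equal_find_block_ranges := by
  intro text start_marker end_marker _ hpre
  unfold Spec_find_block_ranges find_block_ranges find_block_ranges_alt
  have hne : ¬ (start_marker.toList = [] ∧ end_marker.toList = []) := by
    intro ⟨h1, h2⟩
    exact hpre ⟨String.ext (by simpa using h1), String.ext (by simpa using h2)⟩
  have h := loopA_eq_loopB text.toList start_marker.toList end_marker.toList hne
    (text.toList.length + 2) 0 0 le_rfl (Nat.zero_le _) (by omega)
  simpa only [Nat.cast_zero, dropWhile_lt_zero] using h
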